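-- pv_equiv track=rewrite | github.com/sadam-99/Relevance-Model-Information-Retrieval | relevance_model.py | calculate_docfreq_query
-- ===== SOURCE A (Python) =====
-- from collections import Counter
--
-- def calculate_docfreq_query(query_dict):
--     doc_freq_query_dict = {}
--     for q in query_dict.keys():
--         q_dic = {}
--         query_data = Counter(query_dict[q])
--         for q_value in query_dict[q]:
--             count = 0
--             for V in query_dict.values():
--                 if q_value in V:
--                     count += 1
--             term_freq = query_data[q_value]
--             q_dic.update({q_value : {"document_freq" : count,
--                                     "tf" : term_freq,
--                                     "collectionsize": len(query_dict),
--                                     "document_length" : len(query_dict[q]),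
--                                     "max_term_freq": query_data.most_common()[0][1]}})
--         doc_freq_query_dict[q] = q_dic
--     return doc_freq_query_dict
-- ===== SOURCE B (Python) =====
-- from collections import Counter
--
-- def calculate_docfreq_query(query_dict):
--     # Precompute term -> document frequency once (O(Q*L)), instead of
--     # rescanning every query's list for every term occurrence (O(Q^2*L^2)).
--     df = {}
--     for V in query_dict.values():
--         for t in set(V):
--             df[t] = df.get(t, 0) + 1
--     n = len(query_dict)
--     result = {}
--     for q, terms in query_dict.items():
--         counts = Counter(terms)
--         mtf = max(counts.values(), default=0)
--         q_dic = {}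
--         for t in terms:
--             q_dic[t] = {"document_freq": df.get(t, 0),
--                         "tf": counts[t],
--                         "collectionsize": n,
--                         "document_length": len(terms),
--                         "max_term_freq": mtf}
--         result[q] = q_dic
--     return result
-- ===== Notes on version B (the rewrite author's own statement) =====
-- stated objective: faster
-- what changed: B precomputes a global term->document-frequency dict in one pass over all query lists and replaces A's per-term rescan of every list by an O(1) lookup, and computes max_term_freq as max(counts.values()) instead of sorting via most_common().
import Mathlib
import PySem

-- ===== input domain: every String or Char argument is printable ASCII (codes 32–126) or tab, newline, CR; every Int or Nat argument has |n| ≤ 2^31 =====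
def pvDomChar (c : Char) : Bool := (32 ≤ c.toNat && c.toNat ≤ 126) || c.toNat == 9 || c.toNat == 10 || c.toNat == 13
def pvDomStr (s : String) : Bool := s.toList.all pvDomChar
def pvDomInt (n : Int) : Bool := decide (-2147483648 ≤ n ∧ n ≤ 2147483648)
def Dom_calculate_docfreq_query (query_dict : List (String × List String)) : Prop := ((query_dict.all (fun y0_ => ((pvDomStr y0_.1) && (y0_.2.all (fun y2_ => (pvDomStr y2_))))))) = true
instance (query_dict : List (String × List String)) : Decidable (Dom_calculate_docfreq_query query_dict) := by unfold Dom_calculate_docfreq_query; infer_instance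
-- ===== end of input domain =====

-- B precomputes the term -> document-frequency dict once; A rescans every list per term occurrence.
-- Both ports first rebuild the Python dict (last value wins for duplicate keys) from the assoc list.

-- ===== PORT A =====
-- literal transliteration of A; most_common()[0][1] is ported as sorting the counter's
-- items by count descending (CPython's most_common = sorted(items, key=itemgetter(1), reverse=True))
-- and indexing [0]; the 'none' arm of the index is unreachable (the loop runs only when terms ≠ []).
def calculate_docfreq_query (query_dict : List (String × List String)) : List (String × List (String × List (String × Int))) :=
  let d : PySem.Dict String (List String) :=
    query_dict.foldl (fun d p => d.insert p.1 p.2) PySem.Dict.empty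
  let res : PySem.Dict String (PySem.Dict String (List (String × Int))) :=
    d.keys.foldl (fun acc q =>
      let terms := d.getD q []
      let query_data := PySem.Dict.counter terms
      let q_dic : PySem.Dict String (List (String × Int)) :=
        terms.foldl (fun qd q_value =>
          let count : Int := d.values.foldl (fun c V => if V.contains q_value then c + 1 else c) 0
          let term_freq : Int := query_data.getD q_value 0
          let mtf : Int :=
            match PySem.List.pyGet? (PySem.List.sorted query_data.items (fun p => p.2) true) 0 with
            | some p => p.2
            | none => 0
          qd.insert q_value [("document_freq", count), ("tf", term_freq),
            ("collectionsize", (d.size : Int)), ("document_length", (terms.length : Int)),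
            ("max_term_freq", mtf)]) PySem.Dict.empty
      acc.insert q q_dic) PySem.Dict.empty
  res.items.map (fun p => (p.1, p.2.items))

-- ===== PORT B =====
-- B's result dict is keyed by the (distinct) keys of d in order, so its items list is this map.
def calculate_docfreq_query_alt (query_dict : List (String × List String)) : List (String × List (String × List (String × Int))) :=
  let d : PySem.Dict String (List String) :=
    query_dict.foldl (fun d p => d.insert p.1 p.2) PySem.Dict.empty
  let df : PySem.Dict String Int :=
    d.values.foldl (fun df V =>
      (PySem.Set.ofList V).foldl (fun df t => df.insert t (df.getD t 0 + 1)) df) PySem.Dict.empty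
  let n : Int := d.size
  d.items.map (fun p =>
    let terms := p.2
    let counts := PySem.Dict.counter terms
    let mtf : Int := PySem.List.maxD counts.values (fun v => v) 0
    (p.1,
      (terms.foldl (fun qd t =>
          qd.insert t [("document_freq", df.getD t 0), ("tf", counts.getD t 0),
            ("collectionsize", n), ("document_length", (terms.length : Int)),
            ("max_term_freq", mtf)]) (PySem.Dict.empty : PySem.Dict String (List (String × Int)))).items))

-- ===== PRECONDITION & SPEC =====
def Spec_calculate_docfreq_query (query_dict : List (String × List String)) (out : List (String × List (String × List (String × Int)))) : Prop := out = calculate_docfreq_query_alt query_dict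
instance (query_dict : List (String × List String)) (out : List (String × List (String × List (String × Int)))) : Decidable (Spec_calculate_docfreq_query query_dict out) := by unfold Spec_calculate_docfreq_query; infer_instance

-- ===== CLAIM (what is proved, stated in full; the proofs are below) =====
def Claim_equal_calculate_docfreq_query : Prop := ∀ (query_dict : List (String × List String)), Dom_calculate_docfreq_query query_dict → Spec_calculate_docfreq_query query_dict (calculate_docfreq_query query_dict)

-- ===== LEMMAS AND PROOFS =====

-- proof-only abbreviations for the two inner per-query loops
def pvInnerA (d : PySem.Dict String (List String)) (terms : List String) : PySem.Dict String (List (String × Int)) :=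
  terms.foldl (fun qd q_value =>
    qd.insert q_value [("document_freq",
        d.values.foldl (fun c V => if V.contains q_value then c + 1 else c) (0 : Int)),
      ("tf", (PySem.Dict.counter terms).getD q_value 0),
      ("collectionsize", (d.size : Int)), ("document_length", (terms.length : Int)),
      ("max_term_freq",
        match PySem.List.pyGet? (PySem.List.sorted (PySem.Dict.counter terms).items (fun p => p.2) true) 0 with
        | some p => p.2
        | none => 0)]) PySem.Dict.empty

def pvInnerB (d : PySem.Dict String (List String)) (terms : List String) : PySem.Dict String (List (String × Int)) :=
  terms.foldl (fun qd t =>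
    qd.insert t [("document_freq",
        (d.values.foldl (fun df V =>
          (PySem.Set.ofList V).foldl (fun df s => df.insert s (df.getD s 0 + 1)) df) PySem.Dict.empty).getD t 0),
      ("tf", (PySem.Dict.counter terms).getD t 0),
      ("collectionsize", (d.size : Int)), ("document_length", (terms.length : Int)),
      ("max_term_freq", PySem.List.maxD (PySem.Dict.counter terms).values (fun v => v) 0)]) PySem.Dict.empty

-- B's document-frequency dict: getD t 0 counts the value lists containing t.
theorem df_getD (Vs : List (List String)) (d0 : PySem.Dict String Int) (t : String) :
    (Vs.foldl (fun df V =>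
      (PySem.Set.ofList V).foldl (fun df s => df.insert s (df.getD s 0 + 1)) df) d0).getD t 0
    = d0.getD t 0 + (Vs.countP (fun V => V.contains t) : Int) := by
  induction Vs generalizing d0 with
  | nil => simp
  | cons V Vs ih =>
      rw [List.foldl_cons, ih, PySem.Dict.getD_foldl_insert_add_one, List.countP_cons]
      have hnd := PySem.Set.nodup_ofList (xs := V)
      by_cases hm : t ∈ V
      · have h1 : (PySem.Set.ofList V).count t = 1 :=
          List.count_eq_one_of_mem hnd ((PySem.Set.mem_ofList V t).2 hm)
        have hc : V.contains t = true := by simpa using hm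
        rw [h1, hc]
        simp
        omega
      · have h0 : (PySem.Set.ofList V).count t = 0 :=
          List.count_eq_zero_of_not_mem (fun h => hm ((PySem.Set.mem_ofList V t).1 h))
        have hc : V.contains t = false := by simpa using hm
        rw [h0, hc]
        simp

-- most_common()[0][1] of a nonempty counter = max of its values (default 0).
theorem mtf_eq (terms : List String) (ht : terms ≠ []) :
    (match PySem.List.pyGet? (PySem.List.sorted (PySem.Dict.counter terms).items (fun p => p.2) true) 0 with
      | some p => p.2
      | none => 0)
    = PySem.List.maxD (PySem.Dict.counter terms).values (fun v => v) 0 := by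
  have hitems : (PySem.Dict.counter terms).items ≠ [] := by
    rw [PySem.Dict.items_counter]
    simp only [ne_eq, List.map_eq_nil_iff]
    intro h
    cases terms with
    | nil => exact ht rfl
    | cons x xs =>
        have hx := (PySem.Set.mem_ofList (x :: xs) x).2 (by simp)
        rw [h] at hx
        simp at hx
  have hsne : PySem.List.sorted (PySem.Dict.counter terms).items (fun p => p.2) true ≠ [] := by
    rw [ne_eq, PySem.List.sorted_eq_nil_iff]
    exact hitems
  obtain ⟨m, tl, hs⟩ := List.exists_cons_of_ne_nil hsne
  rw [hs]
  have hget : PySem.List.pyGet? (m :: tl) (0 : Int) = some m := by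
    simp [PySem.List.pyGet?, PySem.List.pyIdx?]
  rw [hget]
  show m.2 = PySem.List.maxD (PySem.Dict.counter terms).values (fun v => v) 0
  have hv : (PySem.Dict.counter terms).values = (PySem.Dict.counter terms).items.map (fun p => p.2) := rfl
  have hvne : (PySem.Dict.counter terms).values ≠ [] := by
    rw [hv]
    simpa using hitems
  -- the max side
  obtain ⟨x, t, hvx⟩ := List.exists_cons_of_ne_nil hvne
  have hmax : PySem.List.maxD (PySem.Dict.counter terms).values (fun v => v) 0 = t.foldl max x := by
    rw [hvx, PySem.List.maxD_id_cons]
  have hmem : PySem.List.maxD (PySem.Dict.counter terms).values (fun v => v) 0 ∈ (PySem.Dict.counter terms).values :=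
    PySem.List.maxD_mem _ _ _ hvne
  have hub : ∀ y ∈ (PySem.Dict.counter terms).values, y ≤ PySem.List.maxD (PySem.Dict.counter terms).values (fun v => v) 0 := by
    intro y hy
    rw [hvx, List.mem_cons] at hy
    rw [hmax]
    rcases hy with hy | hy
    · exact hy ▸ (PySem.List.le_foldl_max t x).1
    · exact (PySem.List.le_foldl_max t x).2 y hy
  have hkey := PySem.List.key_head_sorted_rev_ge (PySem.Dict.counter terms).items (fun p => p.2) hs
  have hmmem : m ∈ (PySem.Dict.counter terms).items := by
    have := (PySem.List.sorted_perm (PySem.Dict.counter terms).items (fun p => p.2) true).subset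
    exact this (hs ▸ List.mem_cons_self)
  apply le_antisymm
  · exact hub m.2 (by rw [hv]; exact List.mem_map_of_mem hmmem)
  · rw [hv] at hmem
    obtain ⟨y, hy, hye⟩ := List.mem_map.1 hmem
    rw [← hv] at hye
    rw [← hye]
    exact hkey y hy

-- the outer loop of A, viewed through items, against B's map over items
theorem outer_shape (d : PySem.Dict String (List String)) (hnd : d.keys.Nodup)
    (fA : String → PySem.Dict String (List (String × Int)))
    (fB : List String → PySem.Dict String (List (String × Int)))
    (h : ∀ q, fA q = fB (d.getD q [])) :
    ((d.keys.foldl (fun acc q => acc.insert q (fA q)) PySem.Dict.empty).items.map (fun p => (p.1, p.2.items)))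
    = d.items.map (fun p => (p.1, (fB p.2).items)) := by
  rw [PySem.Dict.items_foldl_insert_fresh d.keys (fun q => q) fA PySem.Dict.empty
      (by intro a _; exact PySem.Dict.contains_empty a) (by simpa using hnd)]
  rw [PySem.Dict.items_eq_map_keys d hnd []]
  have hemp : (PySem.Dict.empty : PySem.Dict String (PySem.Dict String (List (String × Int)))).items = [] := rfl
  rw [hemp, List.nil_append, List.map_map, List.map_map]
  exact List.map_congr_left (fun q _ => by simp [h q])

-- A's inner per-term loop equals B's: the payloads agree for every term of the list
theorem inner_eq (d : PySem.Dict String (List String)) (terms : List String) :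
    pvInnerA d terms = pvInnerB d terms := by
  unfold pvInnerA pvInnerB
  apply PySem.List.foldl_congr_mem
  intro acc t hmem
  have ht : terms ≠ [] := List.ne_nil_of_mem hmem
  rw [mtf_eq terms ht, df_getD, PySem.List.foldl_if_add_one (fun V => V.contains t) d.values 0]
  rw [PySem.Dict.getD_empty]

-- ===== VERDICT (by name: the statement is the Claim_ definition above) =====
theorem calculate_docfreq_query_spec : Claim_equal_calculate_docfreq_query := by
  intro query_dict _
  unfold Spec_calculate_docfreq_query
  simp only [calculate_docfreq_query, calculate_docfreq_query_alt]
  have hnd : (query_dict.foldl (fun d p => d.insert p.1 p.2)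
      (PySem.Dict.empty : PySem.Dict String (List String))).keys.Nodup :=
    PySem.Dict.nodup_keys_foldl_insert_key query_dict Prod.fst (fun _ p => p.2)
      PySem.Dict.empty PySem.Dict.nodup_keys_empty
  set D := query_dict.foldl (fun d p => d.insert p.1 p.2)
      (PySem.Dict.empty : PySem.Dict String (List String)) with hD
  show ((D.keys.foldl (fun acc q => acc.insert q (pvInnerA D (D.getD q []))) PySem.Dict.empty).items.map
        (fun p => (p.1, p.2.items)))
      = D.items.map (fun p => (p.1, (pvInnerB D p.2).items))
  exact outer_shape D hnd (fun q => pvInnerA D (D.getD q [])) (pvInnerB D)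
    (fun q => inner_eq D (D.getD q []))
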